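-- pv_equiv track=rewrite | github.com/SNU-DRL/DEEP-BO | hpo/utils/sample_gen.py | create_schema_list
-- ===== SOURCE A (Python) =====
-- from itertools import combinations
--
-- def create_schema_list(n_p, n_on):
--     arr = []
--     combi = combinations([ i for i in range(n_p)], n_on)
--     for c in combi:
--         a = [0 for i in range(n_p)]
--         for i in c:
--             a[i] = 1
--         arr.append(a)
--     return arr
-- ===== SOURCE B (Python) =====
-- def create_schema_list(n_p, n_on):
--     out = []
--     stack = [(0, n_on, [])]
--     while stack:
--         pos, rem, vec = stack.pop()
--         if pos >= n_p:
--             if rem == 0: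
--                 out.append(vec)
--             continue
--         if n_p - pos - 1 >= rem:
--             stack.append((pos + 1, rem, vec + [0]))
--         if rem > 0:
--             stack.append((pos + 1, rem - 1, vec + [1]))
--     return out
-- ===== Notes on version B (the rewrite author's own statement) =====
-- stated objective: alternative
-- what changed: Replaces itertools.combinations over index tuples (plus building a zero vector and setting the chosen indices per combination) with an explicit-stack DFS that constructs each 0/1 vector position by position, threading the count of remaining ones and pruning branches with too few positions left; vectors are emitted in the same lexicographic order.
import Mathlib
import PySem

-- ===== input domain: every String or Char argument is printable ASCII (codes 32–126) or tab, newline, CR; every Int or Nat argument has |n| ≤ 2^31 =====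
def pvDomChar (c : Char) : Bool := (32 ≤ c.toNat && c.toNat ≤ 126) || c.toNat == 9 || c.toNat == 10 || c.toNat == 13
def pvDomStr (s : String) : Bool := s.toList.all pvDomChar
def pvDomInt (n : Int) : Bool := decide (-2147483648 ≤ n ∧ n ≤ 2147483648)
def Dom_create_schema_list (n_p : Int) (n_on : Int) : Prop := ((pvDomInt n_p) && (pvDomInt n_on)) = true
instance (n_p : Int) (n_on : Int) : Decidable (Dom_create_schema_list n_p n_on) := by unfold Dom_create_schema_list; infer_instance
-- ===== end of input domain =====

-- B replaces itertools.combinations over index tuples by an explicit-stack DFS that builds each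
-- 0/1 vector position by position (1-branch first, pruning when too few positions remain);
-- objective: alternative (no speed claim).

-- ===== PORT A =====
-- itertools.combinations(xs, k) in lexicographic order (library call, ported as the standard recursion)
def pvCombos : List Int → Nat → List (List Int)
  | _, 0 => [[]]
  | [], _ + 1 => []
  | x :: xs, k + 1 =>
    -- itertools short-circuits 'if r > n: return' before iterating
    if (x :: xs).length < k + 1 then []
    else ((pvCombos xs k).map (fun c => x :: c)) ++ pvCombos xs (k + 1)

def create_schema_list (n_p : Int) (n_on : Int) : List (List Int) :=
  -- combi = combinations([i for i in range(n_p)], n_on); n_on < 0 raises (excluded by Pre_)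
  (pvCombos (PySem.List.pyRange 0 n_p 1) n_on.toNat).foldl
    (fun arr c =>
      arr ++ [c.foldl (fun a i => PySem.List.pySetD a i 1)
                ((PySem.List.pyRange 0 n_p 1).map (fun _ => (0 : Int)))])
    []

-- ===== PORT B =====
-- helper for termination of the while loop: each popped frame is replaced by ≤ 2 frames closer to n_p
def pvMeas (n_p : Int) (st : List (Int × Int × List Int)) : Nat :=
  (st.map (fun f => 3 ^ (n_p - f.1).toNat)).sum

-- the while loop of Source B; stack head = top (Python appends/pops at the end).
-- fuel makes the recursion structural; pvMeas of the initial stack is always enough fuel.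
def pvLoop (n_p : Int) : Nat → List (Int × Int × List Int) → List (List Int) → List (List Int)
  | _, [], out => out
  | 0, _ :: _, out => out
  | fuel + 1, (pos, rem, vec) :: rest, out =>
    if n_p ≤ pos then
      pvLoop n_p fuel rest (if rem = 0 then out ++ [vec] else out)
    else
      pvLoop n_p fuel
        ((if 0 < rem then [(pos + 1, rem - 1, vec ++ [1])] else []) ++
         (if rem ≤ n_p - pos - 1 then [(pos + 1, rem, vec ++ [0])] else []) ++ rest)
        out

def create_schema_list_alt (n_p : Int) (n_on : Int) : List (List Int) :=
  pvLoop n_p (pvMeas n_p [(0, n_on, [])]) [(0, n_on, [])] []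

-- ===== PRECONDITION & SPEC =====
-- Pre_ excludes n_on < 0, on which itertools.combinations raises ValueError in A.
def Pre_create_schema_list (n_p : Int) (n_on : Int) : Prop := 0 ≤ n_on
instance (n_p : Int) (n_on : Int) : Decidable (Pre_create_schema_list n_p n_on) := by
  unfold Pre_create_schema_list; infer_instance

def pvWitness_create_schema_list : Int × Int := (4, 2)

def Spec_create_schema_list (n_p : Int) (n_on : Int) (out : List (List Int)) : Prop :=
  out = create_schema_list_alt n_p n_on
instance (n_p : Int) (n_on : Int) (out : List (List Int)) :
    Decidable (Spec_create_schema_list n_p n_on out) := by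
  unfold Spec_create_schema_list; infer_instance

-- ===== CLAIM (what is proved, stated in full; the proofs are below) =====
def Claim_equal_create_schema_list : Prop := ∀ (n_p : Int) (n_on : Int),
  Dom_create_schema_list n_p n_on → Pre_create_schema_list n_p n_on →
  Spec_create_schema_list n_p n_on (create_schema_list n_p n_on)

-- ===== LEMMAS AND PROOFS =====

-- reference spec: all 0/1 vectors of length n with exactly k ones, 1-branch first
def pvS : Nat → Int → List (List Int)
  | 0, k => if k = 0 then [[]] else []
  | n + 1, k =>
      (if 0 < k then (pvS n (k - 1)).map (fun t => 1 :: t) else []) ++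
      (if k ≤ (n : Int) then (pvS n k).map (fun t => 0 :: t) else [])

theorem pvS_zero (n : Nat) : pvS n 0 = [List.replicate n 0] := by
  induction n with
  | zero => simp [pvS]
  | succ n ih => simp [pvS, ih, List.replicate_succ]

theorem pvS_gt : ∀ (n : Nat) (k : Int), (n : Int) < k → pvS n k = []
  | 0, k, h => by
    simp only [pvS]
    rw [if_neg (by omega)]
  | n + 1, k, h => by
    have h1 : (n : Int) < k - 1 := by push_cast at h; omega
    simp only [pvS]
    rw [pvS_gt n (k - 1) h1, if_neg (show ¬ k ≤ (n : Int) by push_cast at h; omega)]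
    simp

theorem pvLoop_spec (n_p : Int) (fuel : Nat) : ∀ (stack : List (Int × Int × List Int))
    (out : List (List Int)), pvMeas n_p stack ≤ fuel →
    pvLoop n_p fuel stack out =
      out ++ stack.flatMap (fun f => (pvS (n_p - f.1).toNat f.2.1).map (fun t => f.2.2 ++ t)) := by
  induction fuel with
  | zero =>
    intro stack out h
    cases stack with
    | nil => simp [pvLoop]
    | cons f rest =>
      exfalso
      have hp : 0 < 3 ^ (n_p - f.1).toNat := Nat.pow_pos (by norm_num)
      simp only [pvMeas, List.map_cons, List.sum_cons] at h
      omega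
  | succ fuel ih =>
    intro stack out h
    match stack with
    | [] => simp [pvLoop]
    | (pos, rem, vec) :: rest =>
      simp only [pvMeas, List.map_cons, List.sum_cons] at h
      rw [pvLoop]
      by_cases hp : n_p ≤ pos
      · have hp3 : 0 < 3 ^ (n_p - pos).toNat := Nat.pow_pos (by norm_num)
        rw [if_pos hp, ih rest _ (by simp only [pvMeas]; omega)]
        have h0 : (n_p - pos).toNat = 0 := by omega
        simp only [List.flatMap_cons, h0, pvS]
        split_ifs <;> simp [List.append_assoc]
      · have hd : (n_p - pos).toNat = (n_p - (pos + 1)).toNat + 1 := by omega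
        have he : 0 < 3 ^ (n_p - (pos + 1)).toNat := Nat.pow_pos (by norm_num)
        rw [hd, pow_succ] at h
        have hb : pvMeas n_p
            ((if 0 < rem then [(pos + 1, rem - 1, vec ++ [1])] else []) ++
             (if rem ≤ n_p - pos - 1 then [(pos + 1, rem, vec ++ [0])] else []) ++ rest) ≤ fuel := by
          simp only [pvMeas, List.map_append, List.sum_append]
          split_ifs <;> simp <;> omega
        rw [if_neg hp, ih _ _ hb]
        have hc : ((n_p - (pos + 1)).toNat : Int) = n_p - pos - 1 := by omega
        simp only [List.flatMap_cons, List.flatMap_append, hd, pvS, hc]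
        split_ifs <;>
          simp [List.map_map, Function.comp_def, List.append_assoc]

theorem alt_eq_pvS (n_p : Int) (n_on : Int) :
    create_schema_list_alt n_p n_on = pvS n_p.toNat n_on := by
  rw [create_schema_list_alt, pvLoop_spec n_p _ _ _ (le_refl _)]
  simp

-- combinations: too few elements gives no combination
theorem pvCombos_nil (xs : List Int) (k : Nat) (h : xs.length < k) : pvCombos xs k = [] := by
  match xs, k with
  | xs, 0 => omega
  | [], k + 1 => rfl
  | x :: xs, k + 1 =>
    simp only [pvCombos]
    rw [if_pos h]

-- every element of a combination comes from the source list
theorem pvCombos_subset (xs : List Int) (k : Nat) (c : List Int) (hc : c ∈ pvCombos xs k) :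
    ∀ x ∈ c, x ∈ xs := by
  induction xs generalizing k c with
  | nil =>
    cases k with
    | zero => simp [pvCombos] at hc; simp [hc]
    | succ k => simp [pvCombos] at hc
  | cons x xs ih =>
    cases k with
    | zero => simp [pvCombos] at hc; simp [hc]
    | succ k =>
      by_cases hg : (x :: xs).length < k + 1
      · rw [pvCombos_nil _ _ hg] at hc
        simp at hc
      simp only [pvCombos, if_neg hg, List.mem_append, List.mem_map] at hc
      rcases hc with ⟨c', hc', rfl⟩ | hc
      · intro y hy
        rcases List.mem_cons.1 hy with rfl | hy
        · exact List.mem_cons_self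
        · exact List.mem_cons_of_mem _ (ih k c' hc' y hy)
      · intro y hy; exact List.mem_cons_of_mem _ (ih (k + 1) c hc y hy)

-- the indicator vectors of the combinations, in order, are exactly pvS
theorem pvCombos_ind (xs : List Int) (k : Nat) (hnd : xs.Nodup) :
    (pvCombos xs k).map (fun c => xs.map (fun i => if i ∈ c then (1 : Int) else 0)) =
      pvS xs.length (k : Int) := by
  induction xs generalizing k with
  | nil =>
    cases k with
    | zero => simp [pvCombos, pvS]
    | succ k =>
      simp only [pvCombos, pvS, List.length_nil]
      rw [if_neg (by omega : ¬((k + 1 : Nat) : Int) = 0)]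
      simp
  | cons x xs ih =>
    have hx : x ∉ xs := (List.nodup_cons.1 hnd).1
    have hnd' : xs.Nodup := (List.nodup_cons.1 hnd).2
    cases k with
    | zero =>
      simp only [Nat.cast_zero, List.length_cons, pvS_zero]
      simp [pvCombos, List.replicate_succ]
    | succ k =>
      by_cases hg : (x :: xs).length < k + 1
      · rw [pvCombos_nil _ _ hg]
        rw [pvS_gt (x :: xs).length ((k + 1 : Nat) : Int) (by simp only [List.length_cons] at hg ⊢; push_cast; omega)]
        rfl
      simp only [pvCombos, if_neg hg, List.map_append, List.map_map]
      have h1 : (pvCombos xs k).map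
          ((fun c => (x :: xs).map (fun i => if i ∈ c then (1 : Int) else 0)) ∘ (fun c => x :: c))
          = (pvS xs.length (k : Int)).map (fun t => 1 :: t) := by
        rw [← ih k hnd', List.map_map]
        apply List.map_congr_left
        intro c _
        simp only [Function.comp, List.map_cons, List.mem_cons, true_or, if_pos]
        congr 1
        apply List.map_congr_left
        intro i hi
        have : i ≠ x := fun h => hx (h ▸ hi)
        simp [this]
      have h2 : (pvCombos xs (k + 1)).map
          (fun c => (x :: xs).map (fun i => if i ∈ c then (1 : Int) else 0))
          = if (((k + 1 : Nat)) : Int) ≤ (xs.length : Int) then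
              (pvS xs.length (((k + 1 : Nat)) : Int)).map (fun t => 0 :: t) else [] := by
        by_cases hk : (((k + 1 : Nat)) : Int) ≤ (xs.length : Int)
        · rw [if_pos hk, ← ih (k + 1) hnd', List.map_map]
          apply List.map_congr_left
          intro c hc
          have hxc : x ∉ c := fun h => hx (pvCombos_subset xs (k + 1) c hc x h)
          simp [hxc]
        · rw [if_neg hk, pvCombos_nil xs (k + 1) (by omega)]
          rfl
      rw [h1, h2]
      simp only [List.length_cons, pvS]
      push_cast
      rw [if_pos (show (0 : Int) < (k : Int) + 1 by omega)]
      have e : ((k : Int) + 1 - 1) = (k : Int) := by ring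
      rw [e]

-- the fold that sets positions of c to 1, read back position by position
theorem foldl_set_getElem? (c : List Int) (v : List Int)
    (hc : ∀ i ∈ c, 0 ≤ i ∧ i.toNat < v.length) (j : Nat) :
    (c.foldl (fun a i => PySem.List.pySetD a i 1) v)[j]? =
      if (j : Int) ∈ c then some 1 else v[j]? := by
  induction c generalizing v with
  | nil => simp
  | cons i c ih =>
    have hi := hc i List.mem_cons_self
    simp only [List.foldl_cons]
    rw [PySem.List.pySetD_of_nonneg _ _ hi.1]
    rw [ih (v.set i.toNat 1) (by intro y hy; have := hc y (List.mem_cons_of_mem _ hy); simpa using this)]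
    by_cases hjc : (j : Int) ∈ c
    · simp [hjc]
    · simp only [hjc, if_false, List.mem_cons]
      by_cases hij : i = (j : Int)
      · have hj : i.toNat = j := by omega
        rw [if_pos (Or.inl hij.symm), List.getElem?_set, if_pos hj]
        simp [hi.2]
      · have hj : i.toNat ≠ j := by omega
        rw [if_neg (by tauto), List.getElem?_set, if_neg hj]

-- A's inner loop builds exactly the indicator vector of c over the index range
theorem inner_eq_ind (n_p : Int) (c : List Int)
    (hc : ∀ i ∈ c, 0 ≤ i ∧ i < n_p) :
    c.foldl (fun a i => PySem.List.pySetD a i 1)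
        ((PySem.List.pyRange 0 n_p 1).map (fun _ => (0 : Int))) =
      (PySem.List.pyRange 0 n_p 1).map (fun i => if i ∈ c then (1 : Int) else 0) := by
  apply List.ext_getElem?
  intro j
  rw [foldl_set_getElem?]
  · by_cases hj : (j : Int) ∈ c
    · have hjr := hc _ hj
      rw [if_pos hj]
      have hjn : j < (PySem.List.pyRange 0 n_p 1).length := by
        rw [PySem.List.length_pyRange_one]; omega
      rw [List.getElem?_map, List.getElem?_eq_getElem hjn]
      rw [PySem.List.getElem_pyRange_one]
      simp [hj]
    · rw [if_neg hj]
      rcases Nat.lt_or_ge j (PySem.List.pyRange 0 n_p 1).length with hlt | hge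
      · have h0 : (0 : Int) + (j : Int) ∉ c := by simpa using hj
        have hlt0 : j < (n_p - 0).toNat := by
          rwa [PySem.List.length_pyRange_one] at hlt
        have hlt' : j < n_p.toNat := by omega
        simp [PySem.List.getElem_pyRange_one, hj, hlt']
      · rw [List.getElem?_eq_none (by simpa using hge), List.getElem?_eq_none (by simpa using hge)]
  · intro i hi
    have := hc i hi
    constructor
    · exact this.1
    · rw [List.length_map, PySem.List.length_pyRange_one]; omega

theorem a_eq_pvS (n_p : Int) (n_on : Int) (h : 0 ≤ n_on) :
    create_schema_list n_p n_on = pvS n_p.toNat n_on := by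
  rw [create_schema_list, PySem.List.foldl_append_singleton_eq_map, List.nil_append]
  rw [List.map_congr_left (fun c hc => inner_eq_ind n_p c (fun i hi => by
        have hm := pvCombos_subset _ _ c hc i hi
        rw [PySem.List.mem_pyRange_one] at hm; omega))]
  rw [pvCombos_ind _ _ (PySem.List.nodup_pyRange_one 0 n_p)]
  rw [PySem.List.length_pyRange_one]
  have h2 : ((n_on.toNat : Nat) : Int) = n_on := by omega
  rw [h2]
  norm_num

-- ===== VERDICT (by name: the statement is the Claim_ definition above) =====
theorem create_schema_list_spec : Claim_equal_create_schema_list := by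
  intro n_p n_on _ hpre
  unfold Spec_create_schema_list
  rw [alt_eq_pvS, a_eq_pvS n_p n_on hpre]
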